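-- pv_equiv track=rewrite | github.com/Constanter/yandex_algorithm_training | homework_2/A_equal_to_the_maximum.py | func
-- ===== SOURCE A (Python) =====
-- def func(lst):
--     max_elem = lst[0]
--     counter = 1
--     for elem in lst[1:]:
--         if elem != 0:
--             if elem > max_elem:
--                 max_elem = elem
--                 counter = 1
--             elif elem == max_elem:
--                 counter += 1
--         else:
--             break
--
--     return counter
-- ===== SOURCE B (Python) =====
-- from itertools import takewhile
--
-- def func(lst):
--     prefix = [lst[0]] + list(takewhile(lambda x: x != 0, lst[1:]))
--     return prefix.count(max(prefix))
-- ===== Notes on version B (the rewrite author's own statement) =====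
-- stated objective: simpler
-- what changed: Replaces A's fused loop (running max, reset/increment counter, break on zero) with materializing the prefix up to the first zero via takewhile, then max() and count() passes.
import Mathlib
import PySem

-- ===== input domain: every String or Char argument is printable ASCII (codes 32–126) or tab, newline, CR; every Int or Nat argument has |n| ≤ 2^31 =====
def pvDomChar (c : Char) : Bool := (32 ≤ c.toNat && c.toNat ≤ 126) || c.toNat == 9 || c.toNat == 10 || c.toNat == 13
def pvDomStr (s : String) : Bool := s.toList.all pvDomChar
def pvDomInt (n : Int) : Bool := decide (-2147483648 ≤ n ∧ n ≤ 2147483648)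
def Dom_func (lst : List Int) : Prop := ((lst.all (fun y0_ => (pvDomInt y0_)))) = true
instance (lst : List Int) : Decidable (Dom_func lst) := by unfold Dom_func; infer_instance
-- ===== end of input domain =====

-- B materializes the pfx up to the first zero (takewhile) and uses max/count passes
-- instead of A's fused running-max/counter loop; objective: simpler. Both raise on [].

-- ===== PORT A =====
-- the for-loop with 'break': structural recursion over lst[1:], state (max_elem, counter)
def funcLoop : List Int → Int → Int → Int
  | [], _, counter => counter
  | elem :: rest, max_elem, counter =>
    if elem ≠ 0 then
      if elem > max_elem then funcLoop rest elem 1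
      else if elem = max_elem then funcLoop rest max_elem (counter + 1)
      else funcLoop rest max_elem counter
    else counter

def func (lst : List Int) : Int :=
  match lst with
  | [] => 0  -- Python raises IndexError on lst[0]; excluded by Pre_func
  | h :: t => funcLoop t h 1

-- ===== PORT B =====
def func_alt (lst : List Int) : Int :=
  match lst with
  | [] => 0  -- Python raises IndexError on lst[0]; excluded by Pre_func
  | h :: t =>
    let pfx := h :: t.takeWhile (fun x => x ≠ 0)
    match PySem.List.max? pfx (fun y => y) with
    | some m => (PySem.List.count pfx m : Int)
    | none => 0  -- unreachable: pfx is nonempty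

-- ===== PRECONDITION & SPEC =====
-- Pre_ excludes exactly the empty list, on which both A and B raise IndexError (lst[0]).
def Pre_func (lst : List Int) : Prop := lst ≠ []
instance (lst : List Int) : Decidable (Pre_func lst) := by unfold Pre_func; infer_instance
def pvWitness_func : List Int := ([3, 1, 3, 0, 3])
def Spec_func (lst : List Int) (out : Int) : Prop := out = func_alt lst
instance (lst : List Int) (out : Int) : Decidable (Spec_func lst out) := by unfold Spec_func; infer_instance

-- ===== CLAIM (what is proved, stated in full; the proofs are below) =====
def Claim_equal_func : Prop := ∀ (lst : List Int), Dom_func lst → Pre_func lst → Spec_func lst (func lst)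

-- ===== LEMMAS AND PROOFS =====

-- helper used by the proofs: the running max dominates its seed
theorem seed_le_foldl_max (p : List Int) (m : Int) : m ≤ p.foldl max m := by
  induction p generalizing m with
  | nil => simp
  | cons x t ih => exact le_trans (le_max_left m x) (ih (max m x))

-- Loop invariant: funcLoop computes, over the pfx p of t up to the first zero,
-- the count of M := p.foldl max m in p, plus c if the running max m survives as the max.
theorem funcLoop_eq (t : List Int) (m c : Int) :
    funcLoop t m c =
      (if (t.takeWhile (fun x => x ≠ 0)).foldl max m = m
       then c + ((t.takeWhile (fun x => x ≠ 0)).count ((t.takeWhile (fun x => x ≠ 0)).foldl max m) : Int)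
       else ((t.takeWhile (fun x => x ≠ 0)).count ((t.takeWhile (fun x => x ≠ 0)).foldl max m) : Int)) := by
  induction t generalizing m c with
  | nil => simp [funcLoop]
  | cons e rest ih =>
    by_cases he : e = 0
    · subst he; simp [funcLoop, List.takeWhile]
    · have htw : (e :: rest).takeWhile (fun x => x ≠ 0)
          = e :: rest.takeWhile (fun x => x ≠ 0) := by
        simp [List.takeWhile, he]
      set p := rest.takeWhile (fun x => x ≠ 0) with hp
      rcases lt_trichotomy e m with hlt | heq | hgt
      · -- e < m: loop keeps (m, c); max m e = m, e ≠ foldl max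
        have hloop : funcLoop (e :: rest) m c = funcLoop rest m c := by
          simp [funcLoop, he]; omega
        have hM : (e :: p).foldl max m = p.foldl max m := by
          simp [List.foldl, max_eq_left hlt.le]
        have hMge : m ≤ p.foldl max m := seed_le_foldl_max p m
        have hne : e ≠ p.foldl max m := by omega
        rw [hloop, ih m c, htw, hM, List.count_cons_of_ne hne]
      · -- e = m: counter increments
        subst heq
        have hloop : funcLoop (e :: rest) e c = funcLoop rest e (c + 1) := by
          simp [funcLoop, he]
        have hM : (e :: p).foldl max e = p.foldl max e := by
          simp [List.foldl]
        rw [hloop, ih e (c + 1), htw, hM]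
        have hMge : e ≤ p.foldl max e := seed_le_foldl_max p e
        by_cases hEq : p.foldl max e = e
        · rw [hEq] at *
          simp [List.count_cons_self]
          ring
        · have hne : e ≠ p.foldl max e := fun h => hEq h.symm
          simp [hEq, List.count_cons_of_ne hne]
      · -- e > m: reset to (e, 1)
        have hloop : funcLoop (e :: rest) m c = funcLoop rest e 1 := by
          simp [funcLoop, he, hgt]
        have hM : (e :: p).foldl max m = p.foldl max e := by
          simp [List.foldl, max_eq_right hgt.le]
        rw [hloop, ih e 1, htw, hM]
        have hMge : e ≤ p.foldl max e := seed_le_foldl_max p e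
        by_cases hEq : p.foldl max e = e
        · have hne : p.foldl max e ≠ m := by omega
          rw [hEq] at *
          simp [hne, List.count_cons_self]
          ring
        · have hne : p.foldl max e ≠ m := by omega
          have hne' : e ≠ p.foldl max e := fun h => hEq h.symm
          simp [hEq, hne, List.count_cons_of_ne hne']

-- ===== VERDICT (by name: the statement is the Claim_ definition above) =====
theorem func_spec : Claim_equal_func := by
  intro lst _ hpre
  unfold Spec_func
  match lst with
  | [] => exact absurd rfl hpre
  | h :: t =>
    show func (h :: t) = func_alt (h :: t)
    rw [func, func_alt]
    simp only [PySem.List.max?_id_cons]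
    rw [funcLoop_eq, PySem.List.count_eq]
    set p := t.takeWhile (fun x => x ≠ 0) with hp
    have hM : h ≤ p.foldl max h := seed_le_foldl_max p h
    by_cases hEq : p.foldl max h = h
    · rw [hEq]; simp [List.count_cons_self]; ring
    · have hne : h ≠ p.foldl max h := fun hh => hEq hh.symm
      simp [hEq, List.count_cons_of_ne hne]
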